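-- pv_equiv track=rewrite | github.com/m-nabeel-anwar/AI-Data-Science-SMIT | Assignment_2.py | Count_Articals
-- ===== SOURCE A (Python) =====
-- def Count_Articals(text):
--     """Count articals in your given data"""
--     Artical_list=["a","an","the"]
--     new_text=text.split(' ')
--     count=0
--     for value in new_text:
--         if value.lower() in Artical_list:
--             count=count+1
--     return count
-- ===== SOURCE B (Python) =====
-- def Count_Articals(text):
--     """Count articals in your given data"""
--     words = [w.lower() for w in text.split(' ')]
--     freq = {}
--     for w in words:
--         freq[w] = freq.get(w, 0) + 1
--     return freq.get('a', 0) + freq.get('an', 0) + freq.get('the', 0)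
-- ===== Notes on version B (the rewrite author's own statement) =====
-- stated objective: idiomatic
-- what changed: B builds a frequency table of the lowercased words in one pass and returns the sum of the three article entries, instead of testing each word's membership in the article list inside the loop.
import Mathlib
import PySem

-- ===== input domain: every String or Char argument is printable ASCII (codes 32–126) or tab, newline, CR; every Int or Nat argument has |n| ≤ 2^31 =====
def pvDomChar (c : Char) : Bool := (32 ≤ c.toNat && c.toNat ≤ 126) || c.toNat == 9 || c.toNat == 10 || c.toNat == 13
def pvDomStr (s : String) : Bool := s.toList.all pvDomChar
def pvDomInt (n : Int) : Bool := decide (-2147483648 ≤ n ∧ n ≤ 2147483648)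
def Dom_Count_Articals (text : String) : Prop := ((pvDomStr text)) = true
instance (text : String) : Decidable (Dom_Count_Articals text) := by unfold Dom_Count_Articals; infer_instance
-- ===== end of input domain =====

-- B builds a one-pass frequency table of the lowercased words and sums the three article entries (idiomatic; same cost).

-- ===== PORT A =====
def Count_Articals (text : String) : Int :=
  let Artical_list : List String := ["a", "an", "the"]
  let new_text := (PySem.Str.split? text " ").getD []   -- sep is the non-empty literal " ", so split? is always some
  new_text.foldl (fun count value =>
    if Artical_list.contains (PySem.Str.lower value) then count + 1 else count) 0

-- ===== PORT B =====
def Count_Articals_alt (text : String) : Int :=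
  let words := ((PySem.Str.split? text " ").getD []).map PySem.Str.lower
  let freq := words.foldl (fun d w => d.insert w (d.getD w 0 + 1)) (PySem.Dict.empty : PySem.Dict String Int)
  freq.getD "a" 0 + freq.getD "an" 0 + freq.getD "the" 0

-- ===== PRECONDITION & SPEC =====
def Spec_Count_Articals (text : String) (out : Int) : Prop := out = Count_Articals_alt text
instance (text : String) (out : Int) : Decidable (Spec_Count_Articals text out) := by unfold Spec_Count_Articals; infer_instance

-- ===== CLAIM (what is proved, stated in full; the proofs are below) =====
def Claim_equal_Count_Articals : Prop := ∀ (text : String), Dom_Count_Articals text → Spec_Count_Articals text (Count_Articals text)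

-- ===== LEMMAS AND PROOFS =====

theorem countP_articles (l : List String) :
    (l.countP (fun x => (["a", "an", "the"] : List String).contains x) : Int)
      = (l.count "a" : Int) + (l.count "an" : Int) + (l.count "the" : Int) := by
  induction l with
  | nil => simp
  | cons x t ih =>
    simp only [List.countP_cons, List.count_cons]
    by_cases h1 : x = "a"
    · subst h1; simp at ih ⊢; omega
    by_cases h2 : x = "an"
    · subst h2; simp at ih ⊢; omega
    by_cases h3 : x = "the"
    · subst h3; simp at ih ⊢; omega
    have hc : (["a", "an", "the"] : List String).contains x = false := by
      simp [h1, h2, h3]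
    simp [hc, h1, h2, h3]; simp at ih; omega

-- ===== VERDICT (by name: the statement is the Claim_ definition above) =====
theorem Count_Articals_spec : Claim_equal_Count_Articals := by
  intro text _
  unfold Spec_Count_Articals Count_Articals Count_Articals_alt
  simp only [PySem.List.foldl_if_add_one, PySem.Dict.getD_foldl_insert_add_one,
    PySem.Dict.getD_empty, zero_add]
  rw [show (fun x => (["a", "an", "the"] : List String).contains (PySem.Str.lower x))
        = ((fun x => (["a", "an", "the"] : List String).contains x) ∘ PySem.Str.lower) from rfl,
      ← List.countP_map, countP_articles]
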